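-- pv_equiv track=rewrite | github.com/Emilymatoke/codility-test-1 | challenge_1.py | solution
-- ===== SOURCE A (Python) =====
-- def solution(S):
--     N = len(S)
--     M = len(S[0])
--
--     # Define a comparator function to compare two strings based on a specific position
--     def compare_strings(i, j, k):
--         return S[j][i] == S[k][i]
--
--     # Iterate through each position in the strings
--     for i in range(M):
--         # Iterate through each pair of strings
--         for j in range(N):
--             for k in range(j + 1, N):
--                 # Check if the characters at position i are the same in both strings
--                 if compare_strings(i, j, k):
--                     # Return the indices of the strings and the position
--                     return [j, k, i]
--
--     # If no pair is found, return an empty array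
--     return []
-- ===== SOURCE B (Python) =====
-- def solution(S):
--     m = len(S[0])
--     for i in range(m):
--         col = [s[i] for s in S]
--         seen = set()
--         j = -1
--         for idx in reversed(range(len(col))):
--             if col[idx] in seen:
--                 j = idx
--             seen.add(col[idx])
--         if j != -1:
--             return [j, j + 1 + col[j + 1:].index(col[j]), i]
--     return []
-- ===== Notes on version B (the rewrite author's own statement) =====
-- stated objective: alternative
-- what changed: Per column, one reverse pass with a seen-set finds the smallest row whose character occurs again below it, then a single forward index scan finds that character's next occurrence, replacing A's nested scan over all row pairs per column; this trades A's early exit on easy inputs for a single-pass column scan.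
-- outside the precondition, e.g. on solution(['ab', 'a']): A returns [0, 1, 0], B returns [0, 1, 0]; on solution(['ab', 'ab', '']): A returns [0, 1, 0], B raises IndexError
import Mathlib
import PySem

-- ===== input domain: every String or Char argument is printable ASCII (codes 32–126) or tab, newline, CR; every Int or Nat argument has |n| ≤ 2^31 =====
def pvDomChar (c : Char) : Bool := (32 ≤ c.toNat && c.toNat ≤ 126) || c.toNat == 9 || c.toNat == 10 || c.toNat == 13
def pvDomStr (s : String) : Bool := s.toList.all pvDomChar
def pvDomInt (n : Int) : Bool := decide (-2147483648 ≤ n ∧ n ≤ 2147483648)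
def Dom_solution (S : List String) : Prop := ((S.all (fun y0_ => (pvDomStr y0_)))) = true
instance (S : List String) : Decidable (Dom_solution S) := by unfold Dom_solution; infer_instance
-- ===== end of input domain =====

-- B replaces A's per-column scan over all row pairs by one reverse pass with a seen-set
-- (finding the smallest row whose character recurs later) plus one forward scan for its partner.

-- ===== PORT A =====
-- S[j][i] as an Option (none = IndexError, outside Pre_)
def pvAtA (S : List String) (j i : Int) : Option Char :=
  (PySem.List.pyGet? S j).bind (fun s => PySem.Str.pyGet? s i)

-- inner 'for k in range(j+1, N)' loop
def aLoopK (S : List String) (i j : Int) : List Int → Option (List Int)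
  | [] => none
  | k :: ks => if pvAtA S j i = pvAtA S k i then some [j, k, i] else aLoopK S i j ks

-- 'for j in range(N)' loop
def aLoopJ (S : List String) (i : Int) : List Int → Option (List Int)
  | [] => none
  | j :: js =>
    match aLoopK S i j (PySem.List.pyRange (j + 1) (Int.ofNat S.length) 1) with
    | some r => some r
    | none => aLoopJ S i js

-- 'for i in range(M)' loop
def aLoopI (S : List String) : List Int → Option (List Int)
  | [] => none
  | i :: is =>
    match aLoopJ S i (PySem.List.pyRange 0 (Int.ofNat S.length) 1) with
    | some r => some r
    | none => aLoopI S is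

def solution (S : List String) : List Int :=
  let M : Int := ((PySem.List.pyGet? S 0).map PySem.Str.len).getD 0
  (aLoopI S (PySem.List.pyRange 0 M 1)).getD []

-- ===== PORT B =====
-- col = [s[i] for s in S]  (Python raises IndexError on a too-short s; such S are outside Pre_)
def colOf (S : List String) (i : Int) : List Char :=
  S.map (fun s => (PySem.Str.pyGet? s i).getD ' ')

-- one step of 'for idx in reversed(range(len(col))): if col[idx] in seen: j = idx; seen.add(col[idx])'
def bScanStep (col : List Char) (st : PySem.Set Char × Int) (idx : Int) : PySem.Set Char × Int :=
  let c := (PySem.List.pyGet? col idx).getD ' '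
  (PySem.Set.add st.1 c, if PySem.Set.contains st.1 c then idx else st.2)

def bFindJ (col : List Char) : Int :=
  (((PySem.List.pyRange 0 (Int.ofNat col.length) 1).reverse).foldl (bScanStep col)
    (PySem.Set.empty, -1)).2

-- 'for i in range(m)' loop of B
def bLoopI (S : List String) : List Int → Option (List Int)
  | [] => none
  | i :: is =>
    let col := colOf S i
    let j := bFindJ col
    if j ≠ -1 then
      let c := (PySem.List.pyGet? col j).getD ' '
      -- col.index never raises here: j ≠ -1 guarantees a later occurrence of c
      some [j, j + 1 + Int.ofNat ((PySem.List.index? (PySem.List.slice col (some (j + 1)) none) c).getD 0), i]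
    else bLoopI S is

def solution_alt (S : List String) : List Int :=
  let M : Int := ((PySem.List.pyGet? S 0).map PySem.Str.len).getD 0
  (bLoopI S (PySem.List.pyRange 0 M 1)).getD []

-- ===== PRECONDITION & SPEC =====
-- Pre_ excludes the empty list and lists in which some string is shorter than the first:
-- there A (and B) index S[j][i] for columns i up to len(S[0]) and can raise IndexError
-- (on part of those inputs A happens to return before reaching a short string — see claim cites).
def Pre_solution (S : List String) : Prop :=
  S ≠ [] ∧ ∀ s ∈ S, (S.headD "").toList.length ≤ s.toList.length
instance (S : List String) : Decidable (Pre_solution S) := by unfold Pre_solution; infer_instance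

def pvWitness_solution : List String := ["ab", "cd"]

def Spec_solution (S : List String) (out : List Int) : Prop := out = solution_alt S
instance (S : List String) (out : List Int) : Decidable (Spec_solution S out) := by unfold Spec_solution; infer_instance

-- ===== CLAIM (what is proved, stated in full; the proofs are below) =====
def Claim_equal_solution : Prop := ∀ (S : List String), Dom_solution S → Pre_solution S → Spec_solution S (solution S)

-- ===== LEMMAS AND PROOFS =====

-- first index j such that cs[j] occurs again later (the per-column answer), structural form
def fdup : List Char → Option Nat
  | [] => none
  | c :: rest => if c ∈ rest then some 0 else (fdup rest).map (· + 1)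

-- canonical per-column result both ports are shown to compute
def mkRes (cs : List Char) (i : Int) (j : Nat) : List Int :=
  [(j : Int), (j : Int) + 1 + Int.ofNat ((PySem.List.index? (cs.drop (j + 1)) (cs.getD j ' ')).getD 0), i]

theorem length_colOf (S : List String) (i : Int) : (colOf S i).length = S.length := by
  simp [colOf]

theorem pvAtA_eq (S : List String) (i : Int) (hi : 0 ≤ i)
    (hlen : ∀ s ∈ S, i.toNat < s.toList.length) (k : Nat) (hk : k < S.length) :
    pvAtA S (k : Int) i = some ((colOf S i).getD k ' ') := by
  have hik : i = ((i.toNat : Nat) : Int) := by omega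
  have hs : S[k] ∈ S := List.getElem_mem hk
  have hlt := hlen _ hs
  simp [pvAtA, colOf, PySem.List.pyGet?_natCast, List.getElem?_eq_getElem hk,
    List.getD_eq_getElem?_getD, List.getElem?_map]
  rw [PySem.List.pyGet?_of_nonneg (h := hi), List.getElem?_eq_getElem hlt]
  simp

theorem aLoopK_eq (S : List String) (i : Int) (hi : 0 ≤ i)
    (hlen : ∀ s ∈ S, i.toNat < s.toList.length) (j : Int) (cj : Char)
    (hj : pvAtA S j i = some cj) :
    ∀ b : Nat, b ≤ S.length →
      aLoopK S i j (PySem.List.pyRange (b : Int) (Int.ofNat S.length) 1) =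
        (PySem.List.index? ((colOf S i).drop b) cj).map (fun d => [j, ((b + d : Nat) : Int), i]) := by
  intro b hb
  obtain ⟨n, hn⟩ : ∃ n, S.length - b = n := ⟨_, rfl⟩
  induction n generalizing b with
  | zero =>
    have hbN : b = S.length := by omega
    subst hbN
    rw [PySem.List.pyRange_one_eq_nil (by simp)]
    rw [List.drop_eq_nil_of_le (by simp [length_colOf])]
    simp [aLoopK, PySem.List.index?]
  | succ n ih =>
    have hbN : b < S.length := by omega
    have hcs : b < (colOf S i).length := by simp [length_colOf]; omega
    rw [PySem.List.pyRange_one_cons (by simp; omega)]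
    rw [List.drop_eq_getElem_cons hcs]
    have hb' : pvAtA S (b : Int) i = some ((colOf S i).getD b ' ') := pvAtA_eq S i hi hlen b hbN
    have hgd : (colOf S i).getD b ' ' = (colOf S i)[b] := List.getD_eq_getElem _ _ hcs
    show (if pvAtA S j i = pvAtA S (b : Int) i then some [j, (b : Int), i]
          else aLoopK S i j (PySem.List.pyRange ((b : Int) + 1) (Int.ofNat S.length) 1)) = _
    rw [hj, hb', hgd]
    by_cases hc : cj = (colOf S i)[b]
    · rw [if_pos (by rw [hc]), ← hc, PySem.List.index?_cons_self]
      simp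
    · rw [if_neg (by simp [hc]), PySem.List.index?_cons_of_ne (h := Ne.symm hc)]
      have : ((b : Int) + 1) = (((b + 1 : Nat) : Int)) := by push_cast; ring
      rw [this, ih (b + 1) (by omega) (by omega)]
      cases PySem.List.index? ((colOf S i).drop (b + 1)) cj with
      | none => simp
      | some d => simp; omega

theorem aLoopJ_eq (S : List String) (i : Int) (hi : 0 ≤ i)
    (hlen : ∀ s ∈ S, i.toNat < s.toList.length) :
    ∀ a : Nat, a ≤ S.length →
      aLoopJ S i (PySem.List.pyRange (a : Int) (Int.ofNat S.length) 1) =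
        (fdup ((colOf S i).drop a)).map (fun d => mkRes (colOf S i) i (a + d)) := by
  intro a ha
  obtain ⟨n, hn⟩ : ∃ n, S.length - a = n := ⟨_, rfl⟩
  induction n generalizing a with
  | zero =>
    have haN : a = S.length := by omega
    subst haN
    rw [PySem.List.pyRange_one_eq_nil (by simp)]
    rw [List.drop_eq_nil_of_le (by simp [length_colOf])]
    simp [aLoopJ, fdup]
  | succ n ih =>
    have haN : a < S.length := by omega
    have hcs : a < (colOf S i).length := by simp [length_colOf]; omega
    rw [PySem.List.pyRange_one_cons (by simp; omega)]
    have hja : pvAtA S (a : Int) i = some ((colOf S i).getD a ' ') := pvAtA_eq S i hi hlen a haN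
    have hgd : (colOf S i).getD a ' ' = (colOf S i)[a] := List.getD_eq_getElem _ _ hcs
    have hcast : ((a : Int) + 1) = (((a + 1 : Nat) : Int)) := by push_cast; ring
    show (match aLoopK S i (a : Int) (PySem.List.pyRange ((a : Int) + 1) (Int.ofNat S.length) 1) with
          | some r => some r
          | none => aLoopJ S i (PySem.List.pyRange ((a : Int) + 1) (Int.ofNat S.length) 1)) = _
    rw [hcast, aLoopK_eq S i hi hlen (a : Int) _ hja (a + 1) (by omega)]
    rw [List.drop_eq_getElem_cons hcs]
    by_cases hmem : (colOf S i)[a] ∈ (colOf S i).drop (a + 1)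
    · have hmem' : (colOf S i).getD a ' ' ∈ (colOf S i).drop (a + 1) := by rw [hgd]; exact hmem
      have hsome : (PySem.List.index? ((colOf S i).drop (a + 1)) ((colOf S i).getD a ' ')).isSome := by
        rw [PySem.List.index?_isSome_iff]; exact hmem'
      obtain ⟨d, hd⟩ := Option.isSome_iff_exists.mp hsome
      rw [hd]
      simp only [fdup, if_pos hmem, Option.map_some, Nat.add_zero, mkRes, hd, Option.getD_some]
      simp [Int.ofNat_eq_natCast]
    · have hnone : PySem.List.index? ((colOf S i).drop (a + 1)) ((colOf S i).getD a ' ') = none := by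
        rw [PySem.List.index?_eq_none_iff, hgd]; exact hmem
      rw [hnone]
      simp only [Option.map_none]
      rw [ih (a + 1) (by omega) (by omega)]
      simp only [fdup, if_neg hmem]
      cases fdup ((colOf S i).drop (a + 1)) with
      | none => simp
      | some d =>
        simp only [Option.map_some]
        have hx : a + 1 + d = a + (d + 1) := by omega
        rw [hx]

theorem bScan_gen (base : List Char) :
    ∀ (cs : List Char) (o : Nat), base.drop o = cs →
      ∃ seen : PySem.Set Char,
        (List.range cs.length).foldr
            (fun k st => bScanStep base st ((o + k : Nat) : Int)) (PySem.Set.empty, -1) =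
          (seen, match fdup cs with | none => -1 | some j => ((o + j : Nat) : Int)) ∧
        (∀ c : Char, PySem.Set.contains seen c = true ↔ c ∈ cs) := by
  intro cs
  induction cs with
  | nil =>
    intro o _
    refine ⟨PySem.Set.empty, ?_, ?_⟩
    · simp [fdup]
    · intro c; simp [PySem.Set.contains, PySem.Set.empty]
  | cons c rest ih =>
    intro o ho
    have hrest : base.drop (o + 1) = rest := by
      have := congrArg List.tail ho
      simpa [List.tail_drop] using this
    obtain ⟨seen, hfold, hmemiff⟩ := ih (o + 1) hrest
    have hbase : base[o]? = some c := by
      have h0 : (base.drop o)[0]? = some c := by rw [ho]; rfl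
      simpa [List.getElem?_drop] using h0
    refine ⟨PySem.Set.add seen c, ?_, ?_⟩
    · rw [show (c :: rest).length = rest.length + 1 from rfl, List.range_succ_eq_map]
      rw [List.foldr_cons, List.foldr_map]
      have hfun : (fun (x : Nat) (y : PySem.Set Char × Int) =>
            bScanStep base y ((o + x.succ : Nat) : Int)) =
          (fun (k : Nat) (st : PySem.Set Char × Int) => bScanStep base st (((o + 1) + k : Nat) : Int)) := by
        funext k st
        congr 2
        omega
      rw [hfun, hfold]
      show bScanStep base (seen, _) ((o + 0 : Nat) : Int) = _
      simp only [bScanStep, Nat.add_zero, PySem.List.pyGet?_natCast, hbase, Option.getD_some]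
      by_cases hc : c ∈ rest
      · rw [if_pos ((hmemiff c).mpr hc)]
        simp [fdup, hc]
      · have : PySem.Set.contains seen c = false := by
          rw [Bool.eq_false_iff]; intro h; exact hc ((hmemiff c).mp h)
        rw [this]
        simp only [fdup, if_neg hc, Bool.false_eq_true, if_false]
        cases fdup rest with
        | none => rfl
        | some j =>
          simp only [Option.map_some]
          have hoj : o + (j + 1) = o + 1 + j := by omega
          rw [hoj]
    · intro x
      have hm : ∀ y : Char, y ∈ seen ↔ y ∈ rest := fun y => by
        rw [← hmemiff y]; simp [PySem.Set.contains]
      simp only [PySem.Set.contains, List.contains_iff_mem, PySem.Set.mem_add, hm x,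
        List.mem_cons]
      tauto

theorem bFindJ_eq (cs : List Char) :
    bFindJ cs = (match fdup cs with | none => -1 | some j => (j : Int)) := by
  unfold bFindJ
  rw [PySem.List.pyRange_one]
  rw [List.foldl_reverse, List.foldr_map]
  have hfun : (fun (x : Nat) (y : PySem.Set Char × Int) => bScanStep cs y (0 + (x : Int))) =
      (fun (k : Nat) (st : PySem.Set Char × Int) => bScanStep cs st (((0 + k : Nat)) : Int)) := by
    funext k st
    congr 1
  have hlen : ((Int.ofNat cs.length - 0).toNat) = cs.length := by simp
  rw [hlen, hfun]
  obtain ⟨seen, hfold, -⟩ := bScan_gen cs cs 0 List.drop_zero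
  rw [hfold]
  cases fdup cs <;> simp

theorem bColumn_eq (S : List String) (i : Int) (is : List Int) :
    bLoopI S (i :: is) =
      (match (fdup (colOf S i)).map (fun j => mkRes (colOf S i) i j) with
       | some r => some r
       | none => bLoopI S is) := by
  show (if bFindJ (colOf S i) ≠ -1 then _ else bLoopI S is) = _
  rw [bFindJ_eq]
  cases hf : fdup (colOf S i) with
  | none => simp
  | some jn =>
    rw [if_pos (by simp)]
    simp only [Option.map_some]
    show some [(jn : Int), (jn : Int) + 1 + Int.ofNat ((PySem.List.index?
        (PySem.List.slice (colOf S i) (some ((jn : Int) + 1)) none)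
        ((PySem.List.pyGet? (colOf S i) (jn : Int)).getD ' ')).getD 0), i] = _
    rw [show ((jn : Int) + 1) = (((jn + 1 : Nat)) : Int) by omega]
    rw [PySem.List.slice_from_natCast]
    simp only [PySem.List.pyGet?_natCast, mkRes, List.getD_eq_getElem?_getD]
    push_cast
    ring_nf

theorem loops_eq (S : List String) (_hS : S ≠ [])
    (hlen : ∀ s ∈ S, (S.headD "").toList.length ≤ s.toList.length) :
    ∀ is : List Int, (∀ i ∈ is, 0 ≤ i ∧ i < ((S.headD "").toList.length : Int)) →
      aLoopI S is = bLoopI S is := by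
  intro is
  induction is with
  | nil => intro _; rfl
  | cons i rest ih =>
    intro hbs
    obtain ⟨hi0, hiM⟩ := hbs i (by simp)
    have hlen' : ∀ s ∈ S, i.toNat < s.toList.length := by
      intro s hs
      have := hlen s hs
      omega
    show (match aLoopJ S i (PySem.List.pyRange 0 (Int.ofNat S.length) 1) with
          | some r => some r
          | none => aLoopI S rest) = _
    rw [show (0 : Int) = ((0 : Nat) : Int) from rfl,
      aLoopJ_eq S i hi0 hlen' 0 (by omega)]
    rw [bColumn_eq]
    simp only [List.drop_zero, Nat.zero_add]
    cases fdup (colOf S i) with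
    | none =>
      simp only [Option.map_none]
      exact ih (fun x hx => hbs x (by simp [hx]))
    | some j => simp

theorem solution_eq_alt (S : List String) (hS : S ≠ [])
    (hlen : ∀ s ∈ S, (S.headD "").toList.length ≤ s.toList.length) :
    solution S = solution_alt S := by
  obtain ⟨s0, tl, rfl⟩ : ∃ s0 tl, S = s0 :: tl := by
    cases S with
    | nil => exact absurd rfl hS
    | cons a b => exact ⟨a, b, rfl⟩
  unfold solution solution_alt
  have hM : ((PySem.List.pyGet? (s0 :: tl) 0).map PySem.Str.len).getD 0 =
      (((s0 :: tl).headD "").toList.length : Int) := by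
    rw [PySem.List.pyGet?_zero_cons]
    simp [PySem.Str.len_eq]
  rw [hM]
  show (aLoopI (s0 :: tl) _).getD [] = (bLoopI (s0 :: tl) _).getD []
  rw [loops_eq (s0 :: tl) hS hlen _ ?_]
  intro x hx
  rw [PySem.List.mem_pyRange_one] at hx
  exact hx

-- ===== VERDICT (by name: the statement is the Claim_ definition above) =====
theorem solution_spec : Claim_equal_solution :=
  fun S _ hPre => solution_eq_alt S hPre.1 hPre.2
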